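-- pv_equiv track=rewrite | github.com/Arsen1302/Code-copy-detector | TestData/solutions/problem_457_5.py | solution_457_5
-- ===== SOURCE A (Python) =====
-- def solution_457_5(s):
--     """
--     :type s: str
--     :rtype: List[int]
--     """
--     h={}
--     ## storing last occurance of each letter in hashtable
--     for i in range(len(s)):
--         h[s[i]]=i
--     m=0
--     a=[]
--     ## 'a' stores the final result
--     ## 'm' stores the largest value of letter's last occurance so far.
--     ## if m equals i then it will be on sub array
--     for i in range(len(s)):
--         if h[s[i]]==i and m==i:
--             a.append(i-sum(a)+1)
--             m=i+1
--         else: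
--             if h[s[i]]>m:
--                 m=h[s[i]]
--     return a
-- ===== SOURCE B (Python) =====
-- def solution_457_5(s):
--     """
--     :type s: str
--     :rtype: List[int]
--     """
--     # One interval [first, last] per distinct character, then merge
--     # overlapping intervals (in first-appearance order) into maximal
--     # blocks and return the block widths.
--     first = {}
--     last = {}
--     for i, c in enumerate(s):
--         if c not in first:
--             first[c] = i
--         last[c] = i
--     res = []
--     block = None  # (start, end) of the open block
--     for c, f in first.items():
--         l = last[c]
--         if block is None:
--             block = (f, l)
--         else:
--             start, end = block
--             if f > end:
--                 res.append(end - start + 1)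
--                 block = (f, l)
--             elif l > end:
--                 block = (start, l)
--     if block is not None:
--         start, end = block
--         res.append(end - start + 1)
--     return res
-- ===== Notes on version B (the rewrite author's own statement) =====
-- stated objective: alternative
-- what changed: Replaces the positional greedy (running max of last occurrences with a cut when it meets the index, width via sum(a)) by a per-character interval construction: record first/last index of each distinct character, then merge the start-sorted intervals into maximal blocks and emit each block's width.
import Mathlib
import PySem

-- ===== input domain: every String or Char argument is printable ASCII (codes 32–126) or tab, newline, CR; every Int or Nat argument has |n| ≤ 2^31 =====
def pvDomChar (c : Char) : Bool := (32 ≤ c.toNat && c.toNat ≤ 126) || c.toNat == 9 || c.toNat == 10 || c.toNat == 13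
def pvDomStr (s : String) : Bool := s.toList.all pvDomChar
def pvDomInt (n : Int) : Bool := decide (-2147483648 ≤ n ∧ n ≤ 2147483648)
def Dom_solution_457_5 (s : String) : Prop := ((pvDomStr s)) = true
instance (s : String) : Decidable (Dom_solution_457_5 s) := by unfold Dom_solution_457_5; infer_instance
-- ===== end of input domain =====

-- B replaces A's positional greedy (running max of last occurrences, cut when it
-- meets the index, segment width via sum(a)) by a per-character first/last
-- interval pass followed by a merge of the start-ordered intervals into maximal
-- blocks; equal return value is proved for every string.

-- ===== PORT A =====
def solution_457_5 (s : String) : List Int :=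
  let h : PySem.Dict Char Int :=
    (PySem.List.enumerate s.toList 0).foldl (fun d p => d.insert p.2 p.1) PySem.Dict.empty
  (((PySem.List.enumerate s.toList 0).foldl
      (fun (st : Int × List Int) p =>
        if h.getD p.2 0 = p.1 ∧ st.1 = p.1 then
          (p.1 + 1, st.2 ++ [p.1 - st.2.sum + 1])
        else if h.getD p.2 0 > st.1 then (h.getD p.2 0, st.2) else st)
      (0, []))).2

-- ===== PORT B =====
def solution_457_5_alt (s : String) : List Int :=
  let fl :=
    (PySem.List.enumerate s.toList 0).foldl
      (fun (fd : PySem.Dict Char Int × PySem.Dict Char Int) p =>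
        ((if fd.1.contains p.2 then fd.1 else fd.1.insert p.2 p.1), fd.2.insert p.2 p.1))
      (PySem.Dict.empty, PySem.Dict.empty)
  let st :=
    fl.1.items.foldl
      (fun (st : Option (Int × Int) × List Int) cf =>
        match st.1 with
        | none => (some (cf.2, fl.2.getD cf.1 0), st.2)
        | some (start, e) =>
          if cf.2 > e then (some (cf.2, fl.2.getD cf.1 0), st.2 ++ [e - start + 1])
          else if fl.2.getD cf.1 0 > e then (some (start, fl.2.getD cf.1 0), st.2)
          else (some (start, e), st.2))
      (none, [])
  match st.1 with
  | none => st.2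
  | some (start, e) => st.2 ++ [e - start + 1]

-- ===== PRECONDITION & SPEC =====
def Spec_solution_457_5 (s : String) (out : List Int) : Prop := out = solution_457_5_alt s
instance (s : String) (out : List Int) : Decidable (Spec_solution_457_5 s out) := by unfold Spec_solution_457_5; infer_instance

-- ===== CLAIM (what is proved, stated in full; the proofs are below) =====
def Claim_equal_solution_457_5 : Prop := ∀ (s : String), Dom_solution_457_5 s → Spec_solution_457_5 s (solution_457_5 s)

-- ===== LEMMAS AND PROOFS =====

-- last-occurrence dictionary and per-position lookup
def pvLD (cs : List Char) : PySem.Dict Char Int :=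
  (PySem.List.enumerate cs 0).foldl (fun d p => d.insert p.2 p.1) PySem.Dict.empty

def pvL (cs : List Char) (i : Nat) : Int := (pvLD cs).getD (cs.getD i ' ') 0

-- first-occurrence dictionary (B's `first`)
def pvFD (cs : List Char) : PySem.Dict Char Int :=
  (PySem.List.enumerate cs 0).foldl
    (fun d p => if d.contains p.2 then d else d.insert p.2 p.1) PySem.Dict.empty

-- prefix max of pvL
def pvP (cs : List Char) : Nat → Int
  | 0 => pvL cs 0
  | (t+1) => max (pvP cs t) (pvL cs (t+1))

-- position i holds the first occurrence of its character
def pvFirst (cs : List Char) (i : Nat) : Bool := decide (cs.getD i ' ' ∉ cs.take i)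

-- index-level step functions and prefix folds
def pvStepA (cs : List Char) (st : Int × List Int) (i : Nat) : Int × List Int :=
  if pvL cs i = (i : Int) ∧ st.1 = (i : Int) then
    ((i : Int) + 1, st.2 ++ [(i : Int) - st.2.sum + 1])
  else if pvL cs i > st.1 then (pvL cs i, st.2) else st

def pvStepB (cs : List Char) (st : Option (Int × Int) × List Int) (i : Nat) :
    Option (Int × Int) × List Int :=
  match st.1 with
  | none => (some ((i : Int), pvL cs i), st.2)
  | some (start, e) =>
    if (i : Int) > e then (some ((i : Int), pvL cs i), st.2 ++ [e - start + 1])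
    else if pvL cs i > e then (some (start, pvL cs i), st.2)
    else (some (start, e), st.2)

def pvFoldA (cs : List Char) (k : Nat) : Int × List Int :=
  (List.range k).foldl (pvStepA cs) (0, [])

def pvFoldB (cs : List Char) (k : Nat) : Option (Int × Int) × List Int :=
  (List.range k).foldl (fun st i => if pvFirst cs i then pvStepB cs st i else st) (none, [])

lemma portA_eq (s : String) :
    solution_457_5 s = (pvFoldA s.toList s.toList.length).2 := by
  unfold solution_457_5 pvFoldA pvStepA pvL pvLD
  simp only [PySem.List.enumerate_eq_map_pyRange (d := ' '), PySem.List.pyRange_zero_natCast,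
    List.foldl_map, PySem.List.pyGetD_natCast, PySem.List.len_eq]

lemma pvLD_append (ys : List Char) (x : Char) :
    pvLD (ys ++ [x]) = (pvLD ys).insert x (ys.length : Int) := by
  unfold pvLD
  rw [PySem.List.enumerate_append]
  simp [PySem.List.enumerate_cons, PySem.List.enumerate_nil, List.foldl_append]

lemma pvL_bounds (cs : List Char) (i : Nat) (hi : i < cs.length) :
    (i : Int) ≤ pvL cs i ∧ pvL cs i < (cs.length : Int) := by
  induction cs using List.reverseRecOn with
  | nil => simp at hi
  | append_singleton ys x ih =>
    unfold pvL
    rw [pvLD_append, PySem.Dict.getD_insert]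
    by_cases hx : (ys ++ [x]).getD i ' ' = x
    · simp only [hx]
      simp at hi ⊢
      exact hi
    · rw [if_neg hx]
      have hilt : i < ys.length := by
        rcases Nat.lt_or_ge i ys.length with h | h
        · exact h
        · exfalso; apply hx
          have : i = ys.length := by simp at hi; omega
          subst this
          simp [List.getD_eq_getElem?_getD]
      have := ih hilt
      have hg : (ys ++ [x]).getD i ' ' = ys.getD i ' ' := by
        simp [List.getD_eq_getElem?_getD, List.getElem?_append_left hilt]
      rw [hg]
      unfold pvL at this
      simp at this ⊢
      omega

lemma pvL_congr (cs : List Char) {i j : Nat} (h : cs.getD j ' ' = cs.getD i ' ') :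
    pvL cs j = pvL cs i := by unfold pvL; rw [h]

lemma pvP_ge_self (cs : List Char) (t : Nat) (ht : t < cs.length) : (t : Int) ≤ pvP cs t := by
  cases t with
  | zero => exact (pvL_bounds cs 0 ht).1
  | succ n => exact le_trans (pvL_bounds cs (n+1) ht).1 (le_max_right _ _)

lemma pvP_lt (cs : List Char) (t : Nat) (ht : t < cs.length) : pvP cs t < (cs.length : Int) := by
  induction t with
  | zero => exact (pvL_bounds cs 0 ht).2
  | succ n ih =>
    simp only [pvP, max_lt_iff]
    exact ⟨ih (by omega), (pvL_bounds cs (n+1) ht).2⟩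

lemma pvL_le_pvP (cs : List Char) {j t : Nat} (h : j ≤ t) : pvL cs j ≤ pvP cs t := by
  induction t with
  | zero => simp_all [pvP]
  | succ n ih =>
    rcases Nat.lt_or_ge j (n+1) with h' | h'
    · exact le_trans (ih (by omega)) (le_max_left _ _)
    · have : j = n + 1 := by omega
      subst this; exact le_max_right _ _

lemma not_first_bound (cs : List Char) {i : Nat} (h1 : 1 ≤ i)
    (h : ¬ pvFirst cs i = true) : pvL cs i ≤ pvP cs (i - 1) := by
  unfold pvFirst at h
  simp only [decide_eq_true_eq, not_not] at h
  obtain ⟨j, hj, hval⟩ := List.getElem_of_mem h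
  have hjlt : j < i := by
    have := List.length_take_le i cs
    omega
  have hjcs : j < cs.length := by
    simp at hj
    omega
  have hget : cs.getD j ' ' = cs.getD i ' ' := by
    have h2 : (cs.take i)[j] = cs[j] := List.getElem_take
    rw [← hval, h2]
    exact List.getD_eq_getElem cs ' ' hjcs
  rw [← pvL_congr cs hget]
  exact pvL_le_pvP cs (by omega)

lemma first_after_cut (cs : List Char) {i : Nat} (h1 : 1 ≤ i) (hi : i < cs.length)
    (hc : pvP cs (i - 1) = ((i : Int) - 1)) : pvFirst cs i = true := by
  by_contra h
  have hb := not_first_bound cs h1 h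
  have := (pvL_bounds cs i hi).1
  omega

lemma pvFD_append (ys : List Char) (x : Char) :
    pvFD (ys ++ [x]) =
      if (pvFD ys).contains x then pvFD ys else (pvFD ys).insert x (ys.length : Int) := by
  unfold pvFD
  rw [PySem.List.enumerate_append]
  simp [PySem.List.enumerate_cons, PySem.List.enumerate_nil, List.foldl_append]

lemma contains_pvFD (cs : List Char) : ∀ c, (pvFD cs).contains c = decide (c ∈ cs) := by
  induction cs using List.reverseRecOn with
  | nil => intro c; simp [pvFD, PySem.List.enumerate_nil, PySem.Dict.contains_empty]
  | append_singleton ys x ih =>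
    intro c
    rw [pvFD_append]
    by_cases hx : x ∈ ys
    · rw [if_pos (by rw [ih]; simpa using hx), ih]
      by_cases hc : c = x <;> simp [hc, hx]
    · rw [if_neg (by rw [ih]; simpa using hx), PySem.Dict.contains_insert, ih]
      by_cases hc : c = x <;> simp [hc]

lemma first_prefix (ys : List Char) (x : Char) (j : Nat) (hj : j < ys.length) :
    pvFirst (ys ++ [x]) j = pvFirst ys j := by
  unfold pvFirst
  rw [List.take_append_of_le_length (by omega), List.getD_eq_getElem?_getD,
      List.getElem?_append_left hj, ← List.getD_eq_getElem?_getD]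

lemma getD_append_left (ys : List Char) (x : Char) (j : Nat) (hj : j < ys.length) :
    (ys ++ [x]).getD j ' ' = ys.getD j ' ' := by
  rw [List.getD_eq_getElem?_getD, List.getElem?_append_left hj, ← List.getD_eq_getElem?_getD]

lemma items_pvFD (cs : List Char) :
    (pvFD cs).items =
      ((List.range cs.length).filter (pvFirst cs)).map (fun i => (cs.getD i ' ', (i : Int))) := by
  induction cs using List.reverseRecOn with
  | nil => simp [pvFD, PySem.List.enumerate_nil]; rfl
  | append_singleton ys x ih =>
    rw [pvFD_append, contains_pvFD]
    have hlen : (ys ++ [x]).length = ys.length + 1 := by simp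
    have hfirstn : pvFirst (ys ++ [x]) ys.length = decide (x ∉ ys) := by
      unfold pvFirst
      rw [List.take_left]
      congr 1
      simp [List.getD_eq_getElem?_getD]
    have hfilter :
        ((List.range (ys ++ [x]).length).filter (pvFirst (ys ++ [x]))).map
            (fun i => ((ys ++ [x]).getD i ' ', (i : Int))) =
          ((List.range ys.length).filter (pvFirst ys)).map
              (fun i => (ys.getD i ' ', (i : Int))) ++
            (if x ∉ ys then [(x, (ys.length : Int))] else []) := by
      rw [hlen, List.range_succ, List.filter_append, List.map_append]
      congr 1
      · have h1 : (List.range ys.length).filter (pvFirst (ys ++ [x])) =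
            (List.range ys.length).filter (pvFirst ys) := by
          apply List.filter_congr
          intro j hj
          rw [first_prefix ys x j (List.mem_range.mp hj)]
        rw [h1]
        apply List.map_congr_left
        intro j hj
        simp only [List.mem_filter, List.mem_range] at hj
        rw [getD_append_left ys x j hj.1]
      · simp only [List.filter_singleton, hfirstn]
        by_cases hx : x ∈ ys <;> simp [hx, List.getD_eq_getElem?_getD]
    rw [hfilter]
    by_cases hx : x ∈ ys
    · rw [if_pos (by simpa using hx), ih]
      simp [hx]
    · rw [if_neg (by simpa using hx)]
      rw [PySem.Dict.items_insert_of_not_contains (pvFD ys) ((ys.length : Nat) : Int)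
            (by rw [contains_pvFD]; simpa using hx)]
      rw [ih]
      simp [hx]

lemma portB_eq (s : String) :
    solution_457_5_alt s =
      (match (pvFoldB s.toList s.toList.length).1 with
       | none => (pvFoldB s.toList s.toList.length).2
       | some (start, e) => (pvFoldB s.toList s.toList.length).2 ++ [e - start + 1]) := by
  have pair_fold : ∀ (l : List (Int × Char)) (a b : PySem.Dict Char Int),
      l.foldl (fun fd p =>
          ((if fd.1.contains p.2 then fd.1 else fd.1.insert p.2 p.1), fd.2.insert p.2 p.1)) (a, b) =
        (l.foldl (fun d p => if d.contains p.2 then d else d.insert p.2 p.1) a,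
         l.foldl (fun d p => d.insert p.2 p.1) b) := by
    intro l a b
    exact PySem.List.foldl_prod_mk
      (fun d p => if d.contains p.2 then d else d.insert p.2 p.1)
      (fun d p => d.insert p.2 p.1) l a b
  unfold solution_457_5_alt pvFoldB pvStepB pvL pvLD
  simp only [pair_fold]
  rw [show (List.foldl (fun d (p : Int × Char) => if d.contains p.2 then d else d.insert p.2 p.1)
        PySem.Dict.empty (PySem.List.enumerate s.toList 0)) = pvFD s.toList from rfl]
  rw [items_pvFD]
  simp only [List.foldl_map, List.foldl_filter]

lemma pvFirst_zero (cs : List Char) : pvFirst cs 0 = true := by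
  simp [pvFirst]

lemma pvFoldA_succ (cs : List Char) (k : Nat) :
    pvFoldA cs (k + 1) = pvStepA cs (pvFoldA cs k) k := by
  unfold pvFoldA; rw [List.range_succ, List.foldl_append]; rfl

lemma pvFoldB_succ (cs : List Char) (k : Nat) :
    pvFoldB cs (k + 1) =
      (if pvFirst cs k then pvStepB cs (pvFoldB cs k) k else pvFoldB cs k) := by
  unfold pvFoldB; rw [List.range_succ, List.foldl_append]; rfl

lemma pvMain (cs : List Char) (t : Nat) (ht : t < cs.length) :
    ∃ res : List Int,
      pvFoldB cs (t + 1) = (some (res.sum, pvP cs t), res) ∧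
      pvFoldA cs (t + 1) =
        (if pvP cs t = (t : Int) then (((t : Int) + 1), res ++ [(t : Int) - res.sum + 1])
         else (pvP cs t, res)) := by
  induction t with
  | zero =>
    refine ⟨[], ?_, ?_⟩
    · rw [pvFoldB_succ, if_pos (pvFirst_zero cs)]
      simp [pvFoldB, pvStepB, pvP]
    · rw [pvFoldA_succ]
      have hb := (pvL_bounds cs 0 ht).1
      by_cases h0 : pvL cs 0 = (0 : Int)
      · simp [pvFoldA, pvStepA, pvP, h0]
      · have hgt : pvL cs 0 > 0 := by omega
        simp [pvFoldA, pvStepA, pvP, h0, hgt]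
  | succ n ihn =>
    obtain ⟨res, hB, hA⟩ := ihn (by omega)
    have hLb := pvL_bounds cs (n + 1) ht
    have hPge := pvP_ge_self cs n (by omega)
    have hPsucc : pvP cs (n + 1) = max (pvP cs n) (pvL cs (n + 1)) := rfl
    rw [pvFoldA_succ, pvFoldB_succ, hA, hB]
    by_cases hc : pvP cs n = (n : Int)
    · -- previous position closed a segment
      have hfirst : pvFirst cs (n + 1) = true := by
        apply first_after_cut cs (by omega) ht
        simp only [Nat.add_sub_cancel]
        rw [hc]; push_cast; ring
      rw [if_pos hfirst, if_pos hc]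
      refine ⟨res ++ [(n : Int) - res.sum + 1], ?_, ?_⟩
      · show pvStepB cs (some (res.sum, pvP cs n), res) (n + 1) = _
        unfold pvStepB
        dsimp only
        simp only [hc]
        rw [if_pos (by push_cast; omega)]
        have hmax : pvP cs (n + 1) = pvL cs (n + 1) := by
          rw [hPsucc, hc]; omega
        simp [hmax, List.sum_append]
        omega
      · show pvStepA cs ((n : Int) + 1, res ++ [(n : Int) - res.sum + 1]) (n + 1) = _
        unfold pvStepA
        by_cases hL : pvL cs (n + 1) = ((n + 1 : Nat) : Int)
        · rw [if_pos (by constructor <;> push_cast <;> omega)]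
          have hP1 : pvP cs (n + 1) = ((n + 1 : Nat) : Int) := by
            rw [hPsucc, hc, hL]; push_cast; omega
          rw [if_pos hP1]
        · have hgt : pvL cs (n + 1) > (n : Int) + 1 := by push_cast at hL hLb ⊢; omega
          rw [if_neg (by push_cast; omega), if_pos (by omega)]
          have hP1 : pvP cs (n + 1) = pvL cs (n + 1) := by rw [hPsucc, hc]; omega
          have hP2 : ¬ pvP cs (n + 1) = ((n + 1 : Nat) : Int) := by
            rw [hP1]; push_cast; omega
          rw [if_neg hP2, hP1]
    · -- segment still open: pvP cs n > n
      have hPgt : pvP cs n > (n : Int) := by omega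
      refine ⟨res, ?_, ?_⟩
      · by_cases hfirst : pvFirst cs (n + 1) = true
        · rw [if_pos hfirst]
          show pvStepB cs (some (res.sum, pvP cs n), res) (n + 1) = _
          unfold pvStepB
          dsimp only
          rw [if_neg (by push_cast; omega)]
          by_cases hgt : pvL cs (n + 1) > pvP cs n
          · rw [if_pos hgt]
            have : pvP cs (n + 1) = pvL cs (n + 1) := by rw [hPsucc]; omega
            rw [this]
          · rw [if_neg hgt]
            have : pvP cs (n + 1) = pvP cs n := by rw [hPsucc]; omega
            rw [this]
        · rw [if_neg hfirst]
          have hle : pvL cs (n + 1) ≤ pvP cs n := by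
            have := not_first_bound cs (i := n + 1) (by omega) hfirst
            simpa using this
          have : pvP cs (n + 1) = pvP cs n := by rw [hPsucc]; omega
          rw [this]
      · rw [if_neg hc]
        show pvStepA cs (pvP cs n, res) (n + 1) = _
        unfold pvStepA
        by_cases hboth : pvL cs (n + 1) = ((n + 1 : Nat) : Int) ∧ pvP cs n = ((n + 1 : Nat) : Int)
        · rw [if_pos (by exact hboth)]
          have hP1 : pvP cs (n + 1) = ((n + 1 : Nat) : Int) := by
            rw [hPsucc, hboth.1, hboth.2]; omega
          rw [if_pos hP1]
        · rw [if_neg hboth]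
          have hP2 : ¬ pvP cs (n + 1) = ((n + 1 : Nat) : Int) := by
            rw [hPsucc]
            intro hmax
            apply hboth
            constructor <;> push_cast at hmax hLb hPgt ⊢ <;> omega
          rw [if_neg hP2]
          by_cases hgt : pvL cs (n + 1) > pvP cs n
          · rw [if_pos hgt]
            have : pvP cs (n + 1) = pvL cs (n + 1) := by rw [hPsucc]; omega
            rw [this]
          · rw [if_neg hgt]
            have : pvP cs (n + 1) = pvP cs n := by rw [hPsucc]; omega
            rw [this]

-- ===== VERDICT (by name: the statement is the Claim_ definition above) =====
theorem solution_457_5_spec : Claim_equal_solution_457_5 := by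
  intro s _
  unfold Spec_solution_457_5
  rw [portA_eq, portB_eq]
  rcases Nat.eq_zero_or_pos s.toList.length with h0 | hpos
  · simp [h0, pvFoldA, pvFoldB]
  · obtain ⟨res, hB, hA⟩ := pvMain s.toList (s.toList.length - 1) (by omega)
    have hn : s.toList.length - 1 + 1 = s.toList.length := by omega
    have h1 := pvP_lt s.toList (s.toList.length - 1) (by omega)
    have h2 := pvP_ge_self s.toList (s.toList.length - 1) (by omega)
    have hcut : pvP s.toList (s.toList.length - 1) = ((s.toList.length - 1 : Nat) : Int) := by
      omega
    rw [hn] at hA hB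
    rw [hA, hB, if_pos hcut, hcut]
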